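-- pv_equiv track=rewrite | github.com/julianhoersch/instrument-geometry-info | Tools/imgcif_mapper.py | fill_frame_info_hdf5
-- ===== SOURCE A (Python) =====
-- def fill_frame_info_hdf5(rec_num, imgfiles, n_frames_per_file):
--
--     tags_dict = {}
--     tags_dict['ARRAY_COLUMNS_SPEC'] = \
--   '    _array_data_external_data.id\n'\
--   '    _array_data_external_data.format\n'\
--   '    _array_data_external_data.uri\n'\
--   '    _array_data_external_data.path\n'\
--   '    _array_data_external_data.frame'
--     array_links = ''
--     frame_links = ''
--     frame_ids = ''
--     scan_frames = ''
--     k = 1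
--     for i, entry in enumerate(imgfiles):
--         fn, dpath = entry
--         for j in range(1, n_frames_per_file[i]+1):
--             array_links += f'        {k:<4} 1 ext{k:<4}\n'
--             frame_links += f'        ext{k:<4} HDF5 https://zenodo.org/record/{rec_num}/files/{fn} {dpath} {j}\n'
--             frame_ids   += f'        {k:<4}  {k:<4} 1\n'
--             scan_frames += f'        {k:<4}  SCAN1 {k:<4}\n'
--             k += 1
--     tags_dict['ARRAY_DATA_INFO'] = array_links
--     tags_dict['DATA_EXT_LINKS'] = frame_links
--     tags_dict['DATA_FRAME_IDS'] = frame_ids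
--     tags_dict['SCAN_FRAME_IDS'] = scan_frames
--
--     return tags_dict
-- ===== SOURCE B (Python) =====
-- def fill_frame_info_hdf5(rec_num, imgfiles, n_frames_per_file):
--     # Flatten the nested structure once into explicit records, then build
--     # each block independently with one join per field.
--     frames = []
--     k = 1
--     for i, (fn, dpath) in enumerate(imgfiles):
--         for j in range(1, n_frames_per_file[i] + 1):
--             frames.append((k, fn, dpath, j))
--             k += 1
--     return {
--         'ARRAY_COLUMNS_SPEC':
--             '    _array_data_external_data.id\n'
--             '    _array_data_external_data.format\n'
--             '    _array_data_external_data.uri\n'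
--             '    _array_data_external_data.path\n'
--             '    _array_data_external_data.frame',
--         'ARRAY_DATA_INFO': ''.join(
--             f'        {k:<4} 1 ext{k:<4}\n' for (k, _, _, _) in frames),
--         'DATA_EXT_LINKS': ''.join(
--             f'        ext{k:<4} HDF5 https://zenodo.org/record/{rec_num}/files/{fn} {dpath} {j}\n'
--             for (k, fn, dpath, j) in frames),
--         'DATA_FRAME_IDS': ''.join(
--             f'        {k:<4}  {k:<4} 1\n' for (k, _, _, _) in frames),
--         'SCAN_FRAME_IDS': ''.join(
--             f'        {k:<4}  SCAN1 {k:<4}\n' for (k, _, _, _) in frames),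
--     }
-- ===== Notes on version B (the rewrite author's own statement) =====
-- stated objective: simpler
-- what changed: Replaces the single nested loop threading four string accumulators with a flatten-once pass building an explicit list of (k, fn, dpath, j) records followed by four independent joins, one per output field.
import Mathlib
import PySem

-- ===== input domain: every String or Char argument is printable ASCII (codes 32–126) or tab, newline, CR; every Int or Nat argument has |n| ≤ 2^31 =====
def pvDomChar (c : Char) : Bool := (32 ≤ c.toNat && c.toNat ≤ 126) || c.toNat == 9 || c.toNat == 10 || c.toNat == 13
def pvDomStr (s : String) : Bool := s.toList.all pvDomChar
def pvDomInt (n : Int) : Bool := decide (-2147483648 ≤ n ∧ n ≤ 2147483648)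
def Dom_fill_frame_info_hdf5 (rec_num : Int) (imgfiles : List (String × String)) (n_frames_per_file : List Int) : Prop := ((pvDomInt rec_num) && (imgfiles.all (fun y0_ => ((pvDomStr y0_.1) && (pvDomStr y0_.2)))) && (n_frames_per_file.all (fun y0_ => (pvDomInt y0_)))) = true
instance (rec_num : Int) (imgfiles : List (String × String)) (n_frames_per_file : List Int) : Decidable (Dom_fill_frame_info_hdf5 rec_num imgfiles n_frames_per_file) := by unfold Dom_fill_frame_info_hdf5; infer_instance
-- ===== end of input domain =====

-- B replaces A's single nested loop threading four string accumulators by one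
-- flatten pass building an explicit record list followed by four independent joins (objective: simpler).


-- ===== PORT A =====
-- f'{k:<4}': str(k) left-justified to width 4 with spaces (exact for any int)
def pvPad4 (n : Int) : String :=
  let s := PySem.Int.toStr n
  s ++ String.ofList (List.replicate (4 - s.toList.length) ' ')

def pvSpecStr : String :=
  "    _array_data_external_data.id\n    _array_data_external_data.format\n    _array_data_external_data.uri\n    _array_data_external_data.path\n    _array_data_external_data.frame"

-- the body of A's inner 'for j in range(1, n_frames_per_file[i]+1)' loop
def pvStepA (rec_num : Int) (fn dpath : String)
    (st : String × String × String × String × Int) (j : Int) :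
    String × String × String × String × Int :=
  let (al, fl, fi, sf, k) := st
  (al ++ "        " ++ pvPad4 k ++ " 1 ext" ++ pvPad4 k ++ "\n",
   fl ++ "        ext" ++ pvPad4 k ++ " HDF5 https://zenodo.org/record/" ++ PySem.Int.toStr rec_num
      ++ "/files/" ++ fn ++ " " ++ dpath ++ " " ++ PySem.Int.toStr j ++ "\n",
   fi ++ "        " ++ pvPad4 k ++ "  " ++ pvPad4 k ++ " 1\n",
   sf ++ "        " ++ pvPad4 k ++ "  SCAN1 " ++ pvPad4 k ++ "\n",
   k + 1)

def fill_frame_info_hdf5 (rec_num : Int) (imgfiles : List (String × String)) (n_frames_per_file : List Int) : List (String × String) :=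
  let st := (PySem.List.enumerate imgfiles).foldl
    (fun st ie =>
      (PySem.List.pyRange 1 ((PySem.List.pyGetD n_frames_per_file ie.1 0) + 1) 1).foldl
        (pvStepA rec_num ie.2.1 ie.2.2) st)
    ("", "", "", "", (1 : Int))
  [("ARRAY_COLUMNS_SPEC", pvSpecStr),
   ("ARRAY_DATA_INFO", st.1),
   ("DATA_EXT_LINKS", st.2.1),
   ("DATA_FRAME_IDS", st.2.2.1),
   ("SCAN_FRAME_IDS", st.2.2.2.1)]

-- ===== PORT B =====
def pvRow1 (k : Int) : String := "        " ++ pvPad4 k ++ " 1 ext" ++ pvPad4 k ++ "\n"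
def pvRow2 (rec_num : Int) (r : Int × String × String × Int) : String :=
  "        ext" ++ pvPad4 r.1 ++ " HDF5 https://zenodo.org/record/" ++ PySem.Int.toStr rec_num
    ++ "/files/" ++ r.2.1 ++ " " ++ r.2.2.1 ++ " " ++ PySem.Int.toStr r.2.2.2 ++ "\n"
def pvRow3 (k : Int) : String := "        " ++ pvPad4 k ++ "  " ++ pvPad4 k ++ " 1\n"
def pvRow4 (k : Int) : String := "        " ++ pvPad4 k ++ "  SCAN1 " ++ pvPad4 k ++ "\n"

-- B's inner loop body: append one record, bump k
def pvStepB (fn dpath : String)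
    (st : List (Int × String × String × Int) × Int) (j : Int) :
    List (Int × String × String × Int) × Int :=
  (st.1 ++ [(st.2, fn, dpath, j)], st.2 + 1)

-- the flatten pass of B: the record list (k, fn, dpath, j) with the final k
def pvFrames (imgfiles : List (String × String)) (n_frames_per_file : List Int) :
    List (Int × String × String × Int) × Int :=
  (PySem.List.enumerate imgfiles).foldl
    (fun st ie =>
      (PySem.List.pyRange 1 ((PySem.List.pyGetD n_frames_per_file ie.1 0) + 1) 1).foldl
        (pvStepB ie.2.1 ie.2.2) st)
    ([], (1 : Int))

def fill_frame_info_hdf5_alt (rec_num : Int) (imgfiles : List (String × String)) (n_frames_per_file : List Int) : List (String × String) :=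
  let frames := (pvFrames imgfiles n_frames_per_file).1
  [("ARRAY_COLUMNS_SPEC", pvSpecStr),
   ("ARRAY_DATA_INFO", PySem.Str.join "" (frames.map (fun r => pvRow1 r.1))),
   ("DATA_EXT_LINKS", PySem.Str.join "" (frames.map (pvRow2 rec_num))),
   ("DATA_FRAME_IDS", PySem.Str.join "" (frames.map (fun r => pvRow3 r.1))),
   ("SCAN_FRAME_IDS", PySem.Str.join "" (frames.map (fun r => pvRow4 r.1)))]

-- ===== PRECONDITION & SPEC =====
-- Pre_ excludes only inputs on which Python A raises IndexError:
-- n_frames_per_file[i] is read for every index i of imgfiles.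
def Pre_fill_frame_info_hdf5 (rec_num : Int) (imgfiles : List (String × String)) (n_frames_per_file : List Int) : Prop :=
  imgfiles.length ≤ n_frames_per_file.length
instance (rec_num : Int) (imgfiles : List (String × String)) (n_frames_per_file : List Int) : Decidable (Pre_fill_frame_info_hdf5 rec_num imgfiles n_frames_per_file) := by unfold Pre_fill_frame_info_hdf5; infer_instance
def pvWitness_fill_frame_info_hdf5 : Int × (List (String × String)) × List Int :=
  (123, [("file.h5", "/entry/data")], [2])
def Spec_fill_frame_info_hdf5 (rec_num : Int) (imgfiles : List (String × String)) (n_frames_per_file : List Int) (out : List (String × String)) : Prop := out = fill_frame_info_hdf5_alt rec_num imgfiles n_frames_per_file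
instance (rec_num : Int) (imgfiles : List (String × String)) (n_frames_per_file : List Int) (out : List (String × String)) : Decidable (Spec_fill_frame_info_hdf5 rec_num imgfiles n_frames_per_file out) := by unfold Spec_fill_frame_info_hdf5; infer_instance

-- ===== CLAIM (what is proved, stated in full; the proofs are below) =====
def Claim_equal_fill_frame_info_hdf5 : Prop := ∀ (rec_num : Int) (imgfiles : List (String × String)) (n_frames_per_file : List Int), Dom_fill_frame_info_hdf5 rec_num imgfiles n_frames_per_file → Pre_fill_frame_info_hdf5 rec_num imgfiles n_frames_per_file → Spec_fill_frame_info_hdf5 rec_num imgfiles n_frames_per_file (fill_frame_info_hdf5 rec_num imgfiles n_frames_per_file)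

-- ===== LEMMAS AND PROOFS =====
lemma pvJoin_empty_flatten (l : List (List Char)) : PySem.Chars.join [] l = l.flatten := by
  induction l with
  | nil => simp [PySem.Chars.join_nil]
  | cons p rest ih =>
    cases rest with
    | nil => simp [PySem.Chars.join, List.intercalate]
    | cons q r => simp [PySem.Chars.join_cons_cons, ih]

lemma pvOfList_append_str (a : List Char) (y : String) :
    String.ofList (a ++ y.toList) = String.ofList a ++ y := by
  have h : (String.ofList (a ++ y.toList)).toList = (String.ofList a ++ y).toList := by simp
  have h2 := congrArg String.ofList h
  simpa using h2

lemma pvJoin_empty_snoc (xs : List String) (y : String) :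
    PySem.Str.join "" (xs ++ [y]) = PySem.Str.join "" xs ++ y := by
  simp only [PySem.Str.join, List.map_append, List.map_cons, List.map_nil]
  rw [show ("" : String).toList = [] from by decide]
  rw [pvJoin_empty_flatten, pvJoin_empty_flatten]
  simp only [List.flatten_append, List.flatten_cons, List.flatten_nil, List.append_nil]
  exact pvOfList_append_str _ y

-- the abstraction map from B's state to A's state
def pvInv (rec_num : Int) (st : List (Int × String × String × Int) × Int) :
    String × String × String × String × Int :=
  (PySem.Str.join "" (st.1.map (fun r => pvRow1 r.1)),
   PySem.Str.join "" (st.1.map (pvRow2 rec_num)),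
   PySem.Str.join "" (st.1.map (fun r => pvRow3 r.1)),
   PySem.Str.join "" (st.1.map (fun r => pvRow4 r.1)),
   st.2)

lemma pvStep_hom (rec_num : Int) (fn dpath : String)
    (st : List (Int × String × String × Int) × Int) (j : Int) :
    pvStepA rec_num fn dpath (pvInv rec_num st) j
      = pvInv rec_num (pvStepB fn dpath st j) := by
  obtain ⟨fr, k⟩ := st
  simp only [pvStepA, pvStepB, pvInv, List.map_append, List.map_cons, List.map_nil,
    pvJoin_empty_snoc, pvRow1, pvRow2, pvRow3, pvRow4]
  simp [String.append_assoc]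

lemma pvInner_hom (rec_num : Int) (fn dpath : String) (js : List Int)
    (st : List (Int × String × String × Int) × Int) :
    js.foldl (pvStepA rec_num fn dpath) (pvInv rec_num st)
      = pvInv rec_num (js.foldl (pvStepB fn dpath) st) := by
  exact List.foldl_hom (pvInv rec_num) (fun x y => pvStep_hom rec_num fn dpath x y)

lemma pvOuter_hom (rec_num : Int) (nf : List Int)
    (l : List (Int × String × String)) (st : List (Int × String × String × Int) × Int) :
    l.foldl (fun s ie =>
        (PySem.List.pyRange 1 ((PySem.List.pyGetD nf ie.1 0) + 1) 1).foldl
          (pvStepA rec_num ie.2.1 ie.2.2) s) (pvInv rec_num st)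
      = pvInv rec_num (l.foldl (fun s ie =>
          (PySem.List.pyRange 1 ((PySem.List.pyGetD nf ie.1 0) + 1) 1).foldl
            (pvStepB ie.2.1 ie.2.2) s) st) := by
  exact List.foldl_hom (pvInv rec_num)
    (fun x ie => pvInner_hom rec_num ie.2.1 ie.2.2 _ x)

lemma pvInv_init (rec_num : Int) :
    pvInv rec_num ([], (1 : Int)) = ("", "", "", "", (1 : Int)) := by
  simp [pvInv, PySem.Str.join, PySem.Chars.join_nil]

-- ===== VERDICT (by name: the statement is the Claim_ definition above) =====
theorem fill_frame_info_hdf5_spec : Claim_equal_fill_frame_info_hdf5 := by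
  intro rec_num imgfiles nf _ _
  show _ = _
  simp only [fill_frame_info_hdf5, fill_frame_info_hdf5_alt, pvFrames]
  rw [← pvInv_init rec_num, pvOuter_hom]
  rfl
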